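-- pv_equiv track=rewrite | github.com/thierryxdp/TCC | problems/822/solution_128169.py | numeros
-- ===== SOURCE A (Python) =====
-- def numeros(lista):
--     tamanho_lista = len(lista)
--     contador = 0
--     maior_ocorrencia = 0
--     while contador < tamanho_lista :
--         if maior_ocorrencia < lista.count(contador):
--             maior_ocorrencia = lista.count(contador)
--         contador = contador + 1
--     return maior_ocorrencia
-- ===== SOURCE B (Python) =====
-- def numeros(lista):
--     n = len(lista)
--     counts = {}
--     for v in lista:
--         if 0 <= v < n:
--             counts[v] = counts.get(v, 0) + 1
--     best = 0
--     for c in counts.values():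
--         if c > best:
--             best = c
--     return best
-- ===== Notes on version B (the rewrite author's own statement) =====
-- stated objective: faster
-- what changed: Replaced the loop that calls lista.count(i) for every i in 0..len-1 (a rescans per candidate) with a single counting pass into a dict followed by a max over its values.
import Mathlib
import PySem

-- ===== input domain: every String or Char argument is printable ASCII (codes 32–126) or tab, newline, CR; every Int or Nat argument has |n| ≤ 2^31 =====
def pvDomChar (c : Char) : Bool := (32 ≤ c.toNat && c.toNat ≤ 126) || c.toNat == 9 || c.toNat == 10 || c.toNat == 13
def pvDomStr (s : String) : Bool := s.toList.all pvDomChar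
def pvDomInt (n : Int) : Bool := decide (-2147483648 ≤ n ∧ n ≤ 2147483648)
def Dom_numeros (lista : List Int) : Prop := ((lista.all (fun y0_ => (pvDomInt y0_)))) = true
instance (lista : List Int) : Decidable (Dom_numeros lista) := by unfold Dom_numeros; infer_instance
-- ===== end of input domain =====

-- B replaces A's per-candidate rescans (lista.count(i) for each i in 0..len-1) with one
-- counting pass into a dict and a max over its values; return value only, neither mutates.

-- ===== PORT A =====
-- while contador < tamanho: update maior_ocorrencia from lista.count(contador); contador += 1
def numerosLoop (lista : List Int) (tamanho contador maior : Int) : Int :=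
  if _h : contador < tamanho then
    numerosLoop lista tamanho (contador + 1)
      (if maior < (PySem.List.count lista contador : Int) then (PySem.List.count lista contador : Int) else maior)
  else maior
termination_by (tamanho - contador).toNat
decreasing_by omega

def numeros (lista : List Int) : Int :=
  numerosLoop lista (lista.length : Int) 0 0

-- ===== PORT B =====
def numeros_alt (lista : List Int) : Int :=
  let n : Int := (lista.length : Int)
  let counts : PySem.Dict Int Int :=
    lista.foldl (fun d v => if 0 ≤ v ∧ v < n then d.insert v (d.getD v 0 + 1) else d) PySem.Dict.empty
  counts.values.foldl (fun best c => if c > best then c else best) 0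

-- ===== PRECONDITION & SPEC =====
def Spec_numeros (lista : List Int) (out : Int) : Prop := out = numeros_alt lista
instance (lista : List Int) (out : Int) : Decidable (Spec_numeros lista out) := by unfold Spec_numeros; infer_instance

-- ===== CLAIM (what is proved, stated in full; the proofs are below) =====
def Claim_equal_numeros : Prop := ∀ (lista : List Int), Dom_numeros lista → Spec_numeros lista (numeros lista)

-- ===== LEMMAS AND PROOFS =====

-- the running-max-of-a-projection loop both ports reduce to
def maxOver (xs : List Int) (f : Int → Int) : Int :=
  xs.foldl (fun acc x => max acc (f x)) 0

lemma foldl_max_proj_mem (f : Int → Int) (xs : List Int) (init : Int) :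
    xs.foldl (fun acc x => max acc (f x)) init = init ∨
      ∃ x ∈ xs, xs.foldl (fun acc x => max acc (f x)) init = f x := by
  induction xs generalizing init with
  | nil => exact Or.inl rfl
  | cons a t ih =>
    rcases ih (max init (f a)) with h | ⟨x, hx, hfx⟩
    · rcases max_choice init (f a) with hm | hm
      · exact Or.inl (by simpa [hm] using h)
      · exact Or.inr ⟨a, by simp, by simpa [hm] using h⟩
    · exact Or.inr ⟨x, by simp [hx], by simpa using hfx⟩

lemma maxOver_nonneg (xs : List Int) (f : Int → Int) : 0 ≤ maxOver xs f :=
  (PySem.List.le_foldl_max_int xs f 0).1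

lemma le_maxOver (xs : List Int) (f : Int → Int) {x : Int} (hx : x ∈ xs) :
    f x ≤ maxOver xs f :=
  (PySem.List.le_foldl_max_int xs f 0).2 x hx

lemma maxOver_le (xs : List Int) (f : Int → Int) (b : Int)
    (h0 : 0 ≤ b) (h : ∀ x ∈ xs, f x ≤ b) : maxOver xs f ≤ b := by
  rcases foldl_max_proj_mem f xs 0 with hm | ⟨x, hx, hm⟩
  · simpa [maxOver, hm] using h0
  · simpa [maxOver, hm] using h x hx

lemma numerosLoop_eq_foldl (lista : List Int) (t c m : Int) :
    numerosLoop lista t c m =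
      (PySem.List.pyRange c t 1).foldl
        (fun acc i => max acc ((lista.count i : Nat) : Int)) m := by
  by_cases h : c < t
  · rw [numerosLoop, PySem.List.pyRange_one_cons h]
    simp only [h, dif_pos, List.foldl_cons]
    rw [numerosLoop_eq_foldl]
    congr 1
    simp [PySem.List.count_eq, max_def]
    omega
  · rw [numerosLoop]
    simp [h, PySem.List.pyRange]
termination_by (t - c).toNat
decreasing_by omega

lemma numeros_eq_maxOver (lista : List Int) :
    numeros lista =
      maxOver (PySem.List.pyRange 0 (lista.length : Int) 1)
        (fun i => ((lista.count i : Nat) : Int)) := by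
  rw [numeros, numerosLoop_eq_foldl]; rfl

lemma numeros_alt_eq_maxOver (lista : List Int) :
    numeros_alt lista =
      maxOver
        (PySem.Set.ofList (lista.filter (fun v => decide (0 ≤ v ∧ v < (lista.length : Int)))))
        (fun k =>
          (((lista.filter (fun v => decide (0 ≤ v ∧ v < (lista.length : Int)))).count k : Nat) : Int)) := by
  unfold numeros_alt
  dsimp only
  rw [PySem.List.foldl_ite_eq_foldl_filter, PySem.Dict.foldl_insert_getD_add_one_eq_counter]
  have hv : (PySem.Dict.counter
      (lista.filter (fun v => decide (0 ≤ v ∧ v < (lista.length : Int))))).values =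
      (PySem.Set.ofList (lista.filter (fun v => decide (0 ≤ v ∧ v < (lista.length : Int))))).map
        (fun k => (((lista.filter (fun v => decide (0 ≤ v ∧ v < (lista.length : Int)))).count k : Nat) : Int)) := by
    show (PySem.Dict.counter _).items.map (·.2) = _
    rw [PySem.Dict.items_counter]
    simp [List.map_map, Function.comp]
  rw [hv, List.foldl_map]
  unfold maxOver
  congr 1
  funext acc c
  simp [max_def]
  omega

lemma count_filter_of_in_range (lista : List Int) {i : Int}
    (h0 : 0 ≤ i) (h1 : i < (lista.length : Int)) :
    (lista.filter (fun v => decide (0 ≤ v ∧ v < (lista.length : Int)))).count i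
      = lista.count i := by
  rw [List.count_filter]
  simp [h0, h1]

-- ===== VERDICT (by name: the statement is the Claim_ definition above) =====
theorem numeros_spec : Claim_equal_numeros := by
  intro lista _
  show numeros lista = numeros_alt lista
  rw [numeros_eq_maxOver, numeros_alt_eq_maxOver]
  set P : Int → Bool := fun v => decide (0 ≤ v ∧ v < (lista.length : Int)) with hP
  apply le_antisymm
  · apply maxOver_le _ _ _ (maxOver_nonneg _ _)
    intro i hi
    rw [PySem.List.mem_pyRange_one] at hi
    by_cases hc : lista.count i = 0
    · simp [hc]; exact maxOver_nonneg _ _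
    · have hmem : i ∈ lista := by
        by_contra hni; exact hc (List.count_eq_zero.mpr hni)
      have hmemf : i ∈ lista.filter P := by
        rw [List.mem_filter]
        exact ⟨hmem, by simp [hP]; omega⟩
      have := le_maxOver (PySem.Set.ofList (lista.filter P))
        (fun k => (((lista.filter P).count k : Nat) : Int))
        ((PySem.Set.mem_ofList _ _).mpr hmemf)
      simp only [hP] at this
      rw [count_filter_of_in_range lista (by omega) (by omega)] at this
      simpa [hP] using this
  · apply maxOver_le _ _ _ (maxOver_nonneg _ _)
    intro k hk
    have hkf : k ∈ lista.filter P := (PySem.Set.mem_ofList _ _).mp hk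
    rw [List.mem_filter, hP] at hkf
    have hrange : 0 ≤ k ∧ k < (lista.length : Int) := by
      have := hkf.2; simpa using this
    rw [count_filter_of_in_range lista hrange.1 hrange.2]
    apply le_maxOver
    rw [PySem.List.mem_pyRange_one]
    omega
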